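-- pv_equiv track=rewrite | github.com/yeele/aoj | problems/ALDS1_4_B_Binary_Search.py | get_set3
-- ===== SOURCE A (Python) =====
-- def get_set3(S:list, T:list):
--     D:dict = {}
--     C = []
--     for s in S:
--         D[s] = 1
--     for t in T:
--         if t in D.keys() and D[t] == 1:
--             D[t] = 2
--             C.append(t)
--     return C
-- ===== SOURCE B (Python) =====
-- def get_set3(S: list, T: list):
--     A = sorted(S)
--
--     def contains(x):
--         lo, hi = 0, len(A)
--         while lo < hi:
--             mid = (lo + hi) // 2
--             if A[mid] < x:
--                 lo = mid + 1
--             else: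
--                 hi = mid
--         return lo < len(A) and A[lo] == x
--
--     return [t for t in dict.fromkeys(T) if contains(t)]
-- ===== Notes on version B (the rewrite author's own statement) =====
-- stated objective: alternative
-- what changed: Replaces A's hash-dict marking loop (values 1->2 fuse membership and dedup in one fused pass) by the classic sorted-array algorithm: sort S once, decide membership with a hand-written lower-bound binary search, and filter the order-preserving dedup of T.
import Mathlib
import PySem

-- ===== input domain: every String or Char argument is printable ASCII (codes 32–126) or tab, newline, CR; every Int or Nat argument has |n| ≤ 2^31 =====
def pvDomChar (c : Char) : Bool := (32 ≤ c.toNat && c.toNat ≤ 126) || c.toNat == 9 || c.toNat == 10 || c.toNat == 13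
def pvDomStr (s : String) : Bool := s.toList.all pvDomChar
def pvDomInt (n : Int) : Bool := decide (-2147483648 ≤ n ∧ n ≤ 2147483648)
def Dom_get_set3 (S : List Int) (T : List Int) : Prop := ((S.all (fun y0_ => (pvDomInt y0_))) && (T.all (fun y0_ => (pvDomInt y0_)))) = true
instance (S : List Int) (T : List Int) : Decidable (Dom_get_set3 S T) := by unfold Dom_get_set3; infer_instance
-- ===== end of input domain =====

-- B replaces A's hash-marking loop (a dict whose 1→2 marks fuse dedup and membership) by the
-- classic sorted-array algorithm: sort S once, decide membership by a hand-written lower-bound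
-- binary search, and filter the ordered dedup of T; objective: alternative (same task, different
-- algorithm and data structure).

-- ===== PORT A =====
-- the loop body of A's second loop ('if t in D.keys() and D[t] == 1: D[t] = 2; C.append(t)');
-- D[t] is only read under the 'in' guard, so getD is exact there
def get_set3_step (p : PySem.Dict Int Int × List Int) (t : Int) : PySem.Dict Int Int × List Int :=
  if p.1.contains t && (p.1.getD t 0 == 1) then (p.1.insert t 2, p.2 ++ [t]) else p

def get_set3 (S : List Int) (T : List Int) : List Int :=
  let D : PySem.Dict Int Int := S.foldl (fun d s => d.insert s 1) PySem.Dict.empty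
  (T.foldl get_set3_step (D, ([] : List Int))).2

-- ===== PORT B =====
-- the 'while lo < hi' loop of Source B's contains; A[mid] is always in range there
-- (0 ≤ lo ≤ mid < hi ≤ len(A)), so getD is exact
def get_set3_lb (A : List Int) (x : Int) (lo hi : Nat) : Nat :=
  if lo < hi then
    let mid := (lo + hi) / 2
    if A.getD mid 0 < x then get_set3_lb A x (mid + 1) hi else get_set3_lb A x lo mid
  else lo
termination_by hi - lo
decreasing_by all_goals omega

-- Source B's 'contains': 'return lo < len(A) and A[lo] == x' (A[lo] only read under the bound)
def get_set3_contains (A : List Int) (x : Int) : Bool :=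
  let lo := get_set3_lb A x 0 A.length
  decide (lo < A.length) && (A.getD lo 0 == x)

def get_set3_alt (S : List Int) (T : List Int) : List Int :=
  let A := PySem.List.sorted S (fun x => x) false
  (PySem.List.dedup T).filter (fun t => get_set3_contains A t)

-- ===== PRECONDITION & SPEC =====
def Spec_get_set3 (S : List Int) (T : List Int) (out : List Int) : Prop := out = get_set3_alt S T
instance (S : List Int) (T : List Int) (out : List Int) : Decidable (Spec_get_set3 S T out) := by unfold Spec_get_set3; infer_instance

-- ===== CLAIM (what is proved, stated in full; the proofs are below) =====
def Claim_equal_get_set3 : Prop := ∀ (S : List Int) (T : List Int), Dom_get_set3 S T → Spec_get_set3 S T (get_set3 S T)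

-- ===== LEMMAS AND PROOFS =====

-- ---- A side: the marking loop computes the S-membership filter of the ordered dedup of T ----

theorem get_set3_buildD_get? (S : List Int) (d : PySem.Dict Int Int) (t : Int) :
    (S.foldl (fun d s => d.insert s 1) d).get? t
      = if t ∈ S then some 1 else d.get? t := by
  induction S generalizing d with
  | nil => simp
  | cons s S ih =>
    simp only [List.foldl_cons, ih, PySem.Dict.get?_insert]
    by_cases h1 : t ∈ S <;> by_cases h2 : t = s <;> simp [h1, h2]

theorem foldl_add_eq (T : List Int) : ∀ (s : List Int),
    T.foldl PySem.Set.add s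
      = s ++ (T.foldl PySem.Set.add []).filter (fun x => !s.contains x) := by
  induction T with
  | nil => intro s; simp
  | cons t T ih =>
    intro s
    have hadd : PySem.Set.add ([] : List Int) t = [t] := by simp [PySem.Set.add]
    simp only [List.foldl_cons, hadd]
    rw [ih (PySem.Set.add s t), ih [t]]
    simp only [PySem.Set.add]
    by_cases h : t ∈ s
    · rw [if_pos (by simpa using h)]
      rw [List.filter_append, List.filter_filter]
      have ht : (fun x => !s.contains x) t = false := by simp [h]
      simp only [List.filter_cons, List.filter_nil, ht, Bool.false_eq_true, if_false,
        List.nil_append]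
      congr 1
      apply List.filter_congr
      intro x _
      by_cases hx : x = t <;> simp [hx, h]
    · rw [if_neg (by simpa using h)]
      rw [List.filter_append, List.filter_filter]
      have ht : (fun x => !s.contains x) t = true := by simp [h]
      simp only [List.filter_cons, List.filter_nil, ht, if_true, List.append_assoc]
      congr 2
      apply List.filter_congr
      intro x _
      by_cases hx : x = t <;> simp [hx, h]

theorem dedup_cons (t : Int) (T : List Int) :
    PySem.List.dedup (t :: T) = t :: (PySem.List.dedup T).filter (fun x => !decide (x = t)) := by
  have h1 : PySem.List.dedup (t :: T) = T.foldl PySem.Set.add [t] := by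
    simp [PySem.List.dedup_eq_ofList, PySem.Set.ofList_eq_foldl, PySem.Set.add]
  have h2 : PySem.List.dedup T = T.foldl PySem.Set.add [] := by
    simp [PySem.List.dedup_eq_ofList, PySem.Set.ofList_eq_foldl]
  rw [h1, foldl_add_eq, h2]
  simp only [List.singleton_append, List.cons.injEq, true_and]
  apply List.filter_congr
  intro x _
  by_cases hx : x = t <;> simp [hx]

theorem get_set3_loop (S : List Int) (T : List Int) : ∀ (D : PySem.Dict Int Int) (C : List Int),
    (∀ t : Int, (D.contains t && (D.getD t 0 == 1)) = (decide (t ∈ S) && !decide (t ∈ C))) →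
    (T.foldl get_set3_step (D, C)).2
      = C ++ (PySem.List.dedup T).filter (fun t => decide (t ∈ S) && !decide (t ∈ C)) := by
  induction T with
  | nil => intro D C _; simp
  | cons t T ih =>
    intro D C h
    simp only [List.foldl_cons, get_set3_step]
    rw [dedup_cons, List.filter_cons]
    by_cases hc : (D.contains t && (D.getD t 0 == 1)) = true
    · have hS : (decide (t ∈ S) && !decide (t ∈ C)) = true := by rw [← h]; exact hc
      have hinv : ∀ x : Int, ((D.insert t 2).contains x && ((D.insert t 2).getD x 0 == 1))
          = (decide (x ∈ S) && !decide (x ∈ (C ++ [t]))) := by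
        intro x
        rw [PySem.Dict.contains_insert, PySem.Dict.getD_insert]
        by_cases hx : x = t
        · subst hx; simp
        · have hxb : (x == t) = false := by simp [hx]
          simp only [hxb, Bool.false_or, if_neg hx, h x, List.mem_append, List.mem_singleton]
          by_cases h1 : x ∈ S <;> by_cases h2 : x ∈ C <;> simp [h1, h2, hx]
      simp only [hc, if_true, hS]
      rw [ih (D.insert t 2) (C ++ [t]) hinv]
      rw [List.append_assoc, List.singleton_append]
      congr 2
      rw [List.filter_filter]
      apply List.filter_congr
      intro x _
      by_cases hx : x = t
      · subst hx; simp
      · simp only [List.mem_append, List.mem_singleton]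
        by_cases h1 : x ∈ S <;> by_cases h2 : x ∈ C <;> simp [h1, h2, hx]
    · have hcf : (D.contains t && (D.getD t 0 == 1)) = false := eq_false_of_ne_true hc
      have hS : (decide (t ∈ S) && !decide (t ∈ C)) = false := by rw [← h]; exact hcf
      simp only [hcf, Bool.false_eq_true, if_false, hS]
      rw [ih D C h, List.filter_filter]
      congr 1
      apply List.filter_congr
      intro x _
      by_cases hx : x = t
      · subst hx; simp [hS]
      · simp [hx]

-- ---- B side: the lower-bound binary search decides membership in a sorted list ----

-- the index Source B's loop converges to, named: length of the strict prefix below x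
def get_set3_L (A : List Int) (x : Int) : Nat :=
  (A.takeWhile (fun y => decide (y < x))).length

theorem get_set3_L_le (A : List Int) (x : Int) : get_set3_L A x ≤ A.length :=
  (List.takeWhile_sublist _).length_le

theorem get_set3_lt_iff (A : List Int) (x : Int) (hs : A.Pairwise (· ≤ ·)) :
    ∀ k, k < A.length → (A.getD k 0 < x ↔ k < get_set3_L A x) := by
  induction A with
  | nil => intro k hk; simp at hk
  | cons a A ih =>
    intro k hk
    rcases List.pairwise_cons.mp hs with ⟨ha, hA⟩
    unfold get_set3_L
    by_cases hax : a < x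
    · rw [List.takeWhile_cons_of_pos (by simpa using hax)]
      cases k with
      | zero => simpa using hax
      | succ k =>
        simp only [List.getD_cons_succ, List.length_cons]
        have := ih hA k (by simpa using hk)
        unfold get_set3_L at this
        omega
    · rw [List.takeWhile_cons_of_neg (by simpa using hax)]
      simp only [List.length_nil]
      cases k with
      | zero => simpa using hax
      | succ k =>
        simp only [List.getD_cons_succ]
        constructor
        · intro hlt
          have hk' : k < A.length := by simpa using hk
          have hmem : A.getD k 0 ∈ A := by
            rw [List.getD_eq_getElem A 0 hk']
            exact List.getElem_mem hk'
          exact absurd (lt_of_le_of_lt (ha _ hmem) hlt) hax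
        · omega

theorem get_set3_lb_eq (A : List Int) (x : Int) (hs : A.Pairwise (· ≤ ·)) :
    ∀ n lo hi, hi - lo ≤ n → lo ≤ get_set3_L A x → get_set3_L A x ≤ hi → hi ≤ A.length →
      get_set3_lb A x lo hi = get_set3_L A x := by
  intro n
  induction n with
  | zero =>
    intro lo hi h1 h2 h3 _
    rw [get_set3_lb, if_neg (by omega)]
    omega
  | succ n ih =>
    intro lo hi h1 h2 h3 h4
    rw [get_set3_lb]
    by_cases hlh : lo < hi
    · rw [if_pos hlh]
      have hmlen : (lo + hi) / 2 < A.length := by omega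
      by_cases hlt : A.getD ((lo + hi) / 2) 0 < x
      · rw [if_pos hlt]
        have hL : (lo + hi) / 2 < get_set3_L A x := (get_set3_lt_iff A x hs _ hmlen).mp hlt
        exact ih ((lo + hi) / 2 + 1) hi (by omega) (by omega) h3 h4
      · rw [if_neg hlt]
        have hL : ¬ (lo + hi) / 2 < get_set3_L A x :=
          fun h => hlt ((get_set3_lt_iff A x hs _ hmlen).mpr h)
        exact ih lo ((lo + hi) / 2) (by omega) h2 (by omega) (by omega)
    · rw [if_neg hlh]
      omega

theorem get_set3_find_eq_mem (A : List Int) (x : Int) (hs : A.Pairwise (· ≤ ·)) :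
    (decide (get_set3_L A x < A.length) && (A.getD (get_set3_L A x) 0 == x))
      = decide (x ∈ A) := by
  induction A with
  | nil => simp [get_set3_L]
  | cons a A ih =>
    rcases List.pairwise_cons.mp hs with ⟨ha, hA⟩
    unfold get_set3_L
    by_cases hax : a < x
    · rw [List.takeWhile_cons_of_pos (by simpa using hax)]
      have hne : ¬ x = a := by omega
      have hmem : decide (x ∈ a :: A) = decide (x ∈ A) := by simp [List.mem_cons, hne]
      simp only [List.length_cons, List.getD_cons_succ, Nat.add_lt_add_iff_right, hmem]
      exact ih hA
    · rw [List.takeWhile_cons_of_neg (by simpa using hax)]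
      simp only [List.length_nil, List.getD_cons_zero]
      by_cases hxa : x = a
      · simp [hxa]
      · have hnx : ¬ x ∈ A := fun hm => by
          have := ha x hm
          omega
        simp [hxa, hnx, Ne.symm hxa]

theorem get_set3_contains_eq_mem (A : List Int) (x : Int) (hs : A.Pairwise (· ≤ ·)) :
    get_set3_contains A x = decide (x ∈ A) := by
  show (decide (get_set3_lb A x 0 A.length < A.length)
      && (A.getD (get_set3_lb A x 0 A.length) 0 == x)) = decide (x ∈ A)
  rw [get_set3_lb_eq A x hs A.length 0 A.length (by omega) (by omega) (get_set3_L_le A x)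
    le_rfl]
  exact get_set3_find_eq_mem A x hs

-- ===== VERDICT (by name: the statement is the Claim_ definition above) =====
theorem get_set3_spec : Claim_equal_get_set3 := by
  intro S T _
  unfold Spec_get_set3 get_set3 get_set3_alt
  have hinv0 : ∀ t : Int,
      (((S.foldl (fun d s => d.insert s 1) (PySem.Dict.empty : PySem.Dict Int Int)).contains t
         && ((S.foldl (fun d s => d.insert s 1) (PySem.Dict.empty : PySem.Dict Int Int)).getD t 0 == 1)))
        = (decide (t ∈ S) && !decide (t ∈ ([] : List Int))) := by
    intro t
    rw [PySem.Dict.contains_eq_isSome_get?, PySem.Dict.getD_eq_get?_getD,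
        get_set3_buildD_get? S PySem.Dict.empty t]
    by_cases h : t ∈ S <;> simp [h]
  rw [get_set3_loop S T _ [] hinv0, List.nil_append]
  apply List.filter_congr
  intro x _
  rw [get_set3_contains_eq_mem _ x (by simpa using PySem.List.sorted_pairwise S (fun x => x))]
  simp [PySem.List.mem_sorted]
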